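-- pv_equiv track=rewrite | github.com/timothydereuse/transformer-omr-spellchecker | data_management/semantic_to_agnostic.py | resolve_tuplet_record
-- ===== SOURCE A (Python) =====
-- def resolve_tuplet_record(tuplet_record):
--     # replaces runs of the same tuplet value in tuplet record (3 triplets, 5 quintuplets, 7 septuplets, etc)
--     # with just a central one
--     tr = {k:tuplet_record[k] for k in tuplet_record.keys() if tuplet_record[k] > 0}
--     ks = list(tr.keys())
--     to_insert = {}
--
--     for i in range(len(ks)):
--         k = ks[i]
--         try:
--             to_check = tr[k]
--         except KeyError:
--             continue
--
--         next_keys_indices = [i + x for x in range(to_check) if i + x < len(ks)]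
--         next_trs = [tr[ks[x]] == to_check for x in next_keys_indices]
--
--         if all(next_trs):
--             # get the middle + 1 index here
--             mid_idx = min(len(next_keys_indices) // 2, len(next_keys_indices) - 1)
--             idx_to_insert = ks[next_keys_indices[mid_idx]]
--             to_insert[idx_to_insert] = to_check
--             for x in next_keys_indices:
--                 del tr[ks[x]]
--
--     return to_insert
-- ===== SOURCE B (Python) =====
-- def resolve_tuplet_record(tuplet_record):
--     # Run-length encode the positive-valued entries; for each run of value v and
--     # length L emit the middle key of each of the L//v full blocks, plus the
--     # middle of the truncated leftover block when the run reaches the end.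
--     items = [kv for kv in tuplet_record.items() if kv[1] > 0]
--     n = len(items)
--     out = {}
--     i = 0
--     while i < n:
--         v = items[i][1]
--         j = i + 1
--         while j < n and items[j][1] == v:
--             j += 1
--         L = j - i
--         for b in range(L // v):
--             out[items[i + b * v + v // 2][0]] = v
--         r = L % v
--         if r > 0 and j == n:
--             out[items[i + (L // v) * v + r // 2][0]] = v
--         i = j
--     return out
-- ===== Notes on version B (the rewrite author's own statement) =====
-- stated objective: faster
-- what changed: A repeatedly rebuilds index/lookup windows over a mutable dict (and iterates range(value) per key); B run-length encodes the positive entries once and emits each run's block middles directly in one pass.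
import Mathlib
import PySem

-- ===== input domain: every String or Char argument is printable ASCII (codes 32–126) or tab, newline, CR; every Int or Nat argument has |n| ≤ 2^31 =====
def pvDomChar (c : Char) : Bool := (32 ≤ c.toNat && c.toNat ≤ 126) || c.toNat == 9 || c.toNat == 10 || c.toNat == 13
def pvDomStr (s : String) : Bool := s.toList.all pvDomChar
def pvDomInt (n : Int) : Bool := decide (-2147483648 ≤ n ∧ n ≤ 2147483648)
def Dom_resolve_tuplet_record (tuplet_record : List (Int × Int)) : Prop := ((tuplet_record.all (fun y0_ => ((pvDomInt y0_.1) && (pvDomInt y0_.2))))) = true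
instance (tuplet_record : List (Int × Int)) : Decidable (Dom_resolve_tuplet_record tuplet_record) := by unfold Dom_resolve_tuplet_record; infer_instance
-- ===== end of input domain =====

-- B replaces A's quadratic delete-and-rescan dict walk by a single run-length-encoding pass
-- (per run of equal values emit the middles of its full blocks plus the end-truncated leftover).

-- ===== PORT A =====
-- The dict argument is decoded with Python's dict() semantics (first key position, last value).
-- Inside the loop, Python's `tr[ks[x]]` lookups are ported with a .getD default; they are exact
-- because every looked-up key is still present whenever the Python program reaches that line.
def resolve_tuplet_record (tuplet_record : List (Int × Int)) : List (Int × Int) :=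
  let d : PySem.Dict Int Int := PySem.Dict.ofList tuplet_record
  -- tr = {k: tuplet_record[k] for k in tuplet_record.keys() if tuplet_record[k] > 0}
  let tr : PySem.Dict Int Int :=
    (d.keys.filter (fun k => decide (d.getD k 0 > 0))).foldl
      (fun acc k => acc.insert k (d.getD k 0)) PySem.Dict.empty
  let ks : List Int := tr.keys
  let st := (PySem.List.pyRange 0 (ks.length : Int)).foldl
    (fun (st : PySem.Dict Int Int × PySem.Dict Int Int) i =>
      let k := PySem.List.pyGetD ks i 0
      match st.1.get? k with
      | none => st          -- except KeyError: continue
      | some to_check =>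
        let next_keys_indices :=
          ((PySem.List.pyRange 0 to_check).filter
            (fun x => decide (i + x < (ks.length : Int)))).map (fun x => i + x)
        let next_trs := next_keys_indices.map
          (fun x => ((st.1.get? (PySem.List.pyGetD ks x 0)).getD 0) == to_check)
        if next_trs.all id then
          let mid_idx := min (PySem.Int.floordiv (next_keys_indices.length : Int) 2)
                             ((next_keys_indices.length : Int) - 1)
          let idx_to_insert := PySem.List.pyGetD ks (PySem.List.pyGetD next_keys_indices mid_idx 0) 0
          (next_keys_indices.foldl (fun t x => t.erase (PySem.List.pyGetD ks x 0)) st.1,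
           st.2.insert idx_to_insert to_check)
        else st)
    (tr, PySem.Dict.empty)
  st.2.items

-- ===== PORT B =====
-- B's outer while-loop over runs, as recursion on the suffix: run = items[i:j], tail = items[j:].
def pvAltLoop (l : List (Int × Int)) (out : PySem.Dict Int Int) : PySem.Dict Int Int :=
  match l with
  | [] => out
  | (k, v) :: rest =>
    let run := (k, v) :: rest.takeWhile (fun kv => kv.2 == v)
    let tail := rest.dropWhile (fun kv => kv.2 == v)
    let L : Int := (run.length : Int)
    let full := PySem.Int.floordiv L v
    let r := PySem.Int.mod L v
    let out1 := (PySem.List.pyRange 0 full).foldl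
      (fun o b => o.insert (PySem.List.pyGetD run (b * v + PySem.Int.floordiv v 2) (0, 0)).1 v) out
    let out2 := if r > 0 ∧ tail = [] then
        out1.insert (PySem.List.pyGetD run (full * v + PySem.Int.floordiv r 2) (0, 0)).1 v
      else out1
    pvAltLoop tail out2
termination_by l.length
decreasing_by
  have := List.length_dropWhile_le (fun kv : Int × Int => kv.2 == v) rest
  simp only [List.length_cons]
  omega

def resolve_tuplet_record_alt (tuplet_record : List (Int × Int)) : List (Int × Int) :=
  let d : PySem.Dict Int Int := PySem.Dict.ofList tuplet_record
  let items := d.items.filter (fun kv => decide (kv.2 > 0))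
  (pvAltLoop items PySem.Dict.empty).items

-- ===== PRECONDITION & SPEC =====
def Spec_resolve_tuplet_record (tuplet_record : List (Int × Int)) (out : List (Int × Int)) : Prop := out = resolve_tuplet_record_alt tuplet_record
instance (tuplet_record : List (Int × Int)) (out : List (Int × Int)) : Decidable (Spec_resolve_tuplet_record tuplet_record out) := by unfold Spec_resolve_tuplet_record; infer_instance

-- ===== CLAIM (what is proved, stated in full; the proofs are below) =====
def Claim_equal_resolve_tuplet_record : Prop := ∀ (tuplet_record : List (Int × Int)), Dom_resolve_tuplet_record tuplet_record → Spec_resolve_tuplet_record tuplet_record (resolve_tuplet_record tuplet_record)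

-- ===== LEMMAS AND PROOFS =====

-- abbreviations for the shared decoding of the input
def pvD (l : List (Int × Int)) : PySem.Dict Int Int := PySem.Dict.ofList l
def pvItems (l : List (Int × Int)) : List (Int × Int) := (pvD l).items.filter (fun kv => decide (kv.2 > 0))
def pvTr0 (l : List (Int × Int)) : PySem.Dict Int Int :=
  ((pvD l).keys.filter (fun k => decide ((pvD l).getD k 0 > 0))).foldl
    (fun acc k => acc.insert k ((pvD l).getD k 0)) PySem.Dict.empty

-- A's loop body, named for the proofs (definitionally the lambda in the port)
def pvStepA (ks : List Int) (st : PySem.Dict Int Int × PySem.Dict Int Int) (i : Int) :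
    PySem.Dict Int Int × PySem.Dict Int Int :=
  let k := PySem.List.pyGetD ks i 0
  match st.1.get? k with
  | none => st
  | some to_check =>
    let next_keys_indices :=
      ((PySem.List.pyRange 0 to_check).filter
        (fun x => decide (i + x < (ks.length : Int)))).map (fun x => i + x)
    let next_trs := next_keys_indices.map
      (fun x => ((st.1.get? (PySem.List.pyGetD ks x 0)).getD 0) == to_check)
    if next_trs.all id then
      let mid_idx := min (PySem.Int.floordiv (next_keys_indices.length : Int) 2)
                         ((next_keys_indices.length : Int) - 1)
      let idx_to_insert := PySem.List.pyGetD ks (PySem.List.pyGetD next_keys_indices mid_idx 0) 0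
      (next_keys_indices.foldl (fun t x => t.erase (PySem.List.pyGetD ks x 0)) st.1,
       st.2.insert idx_to_insert to_check)
    else st

-- pure model of A's scan: position i, indices in [i, e) are the deleted tail of the last window
def pvGo2 (items : List (Int × Int)) (i e : Nat) (out : PySem.Dict Int Int) : PySem.Dict Int Int :=
  if h : i < items.length then
    if i < e then pvGo2 items (i+1) e out
    else
      if (List.range' i (min (i + (items.getD i (0,0)).2.toNat) items.length - i)).all
          (fun x => (items.getD x (0,0)).2 == (items.getD i (0,0)).2) then
        pvGo2 items (i+1) (min (i + (items.getD i (0,0)).2.toNat) items.length)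
          (out.insert
            (items.getD
              (i + (min (i + (items.getD i (0,0)).2.toNat) items.length - i)/2) (0,0)).1
            (items.getD i (0,0)).2)
      else pvGo2 items (i+1) i out
  else out
termination_by items.length - i
decreasing_by all_goals omega

lemma pvA_eq (l : List (Int × Int)) :
    resolve_tuplet_record l
      = (((PySem.List.pyRange 0 (((pvTr0 l).keys.length : Nat) : Int)).foldl
          (pvStepA (pvTr0 l).keys) (pvTr0 l, PySem.Dict.empty)).2).items := rfl

lemma pvB_eq (l : List (Int × Int)) :
    resolve_tuplet_record_alt l = (pvAltLoop (pvItems l) PySem.Dict.empty).items := rfl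

lemma pvTr0_items (l : List (Int × Int)) : (pvTr0 l).items = pvItems l := by
  unfold pvTr0 pvItems
  have hnd : (pvD l).keys.Nodup := PySem.Dict.nodup_keys_ofList l
  have hfil : ((pvD l).keys.filter (fun k => decide ((pvD l).getD k 0 > 0))).Nodup :=
    hnd.filter _
  have h := PySem.Dict.items_foldl_insert_fresh
      ((pvD l).keys.filter (fun k => decide ((pvD l).getD k 0 > 0)))
      (fun k => k) (fun k => (pvD l).getD k 0) PySem.Dict.empty
      (fun a _ => by simp)
      (by simpa using hfil)
  rw [h]
  rw [show (pvD l).items = (pvD l).keys.map (fun k => (k, (pvD l).getD k 0)) from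
      PySem.Dict.items_eq_map_keys (pvD l) hnd 0]
  rw [List.filter_map]
  simp [PySem.Dict.empty]
  rfl

lemma find?_filter_ne (l : List (Int × Int)) (k k' : Int) :
    (l.filter (fun p => !(p.1 == k))).find? (fun p => p.1 == k')
      = if k' = k then none else l.find? (fun p => p.1 == k') := by
  induction l with
  | nil => simp
  | cons a t ih =>
    by_cases hk : a.1 = k
    · rw [List.filter_cons_of_neg (by simp [hk]), ih]
      by_cases h' : k' = k
      · simp [h']
      · simp only [if_neg h']
        rw [List.find?_cons_of_neg (by simp [hk]; omega)]
    · rw [List.filter_cons_of_pos (by simp [hk])]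
      by_cases h2 : a.1 = k'
      · rw [List.find?_cons_of_pos (by simp [h2]), if_neg (fun h => hk (by rw [h] at h2; exact h2))]
        rw [List.find?_cons_of_pos (by simp [h2])]
      · rw [List.find?_cons_of_neg (by simp [h2]), List.find?_cons_of_neg (by simp [h2]), ih]

lemma dict_get?_erase (d : PySem.Dict Int Int) (k k' : Int) :
    (d.erase k).get? k' = if k' = k then none else d.get? k' := by
  simp only [PySem.Dict.get?, PySem.Dict.erase, find?_filter_ne]
  split <;> simp

lemma dict_get?_foldl_erase (keys : List Int) (d : PySem.Dict Int Int) (k' : Int) :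
    ((keys.foldl (fun t x => t.erase x) d).get? k') = if k' ∈ keys then none else d.get? k' := by
  induction keys generalizing d with
  | nil => simp
  | cons a t ih =>
    simp only [List.foldl_cons, ih, dict_get?_erase, List.mem_cons]
    by_cases h1 : k' ∈ t <;> by_cases h2 : k' = a <;> simp [h1, h2]

lemma filter_range_lt (n c : Nat) :
    (List.range n).filter (fun x => decide (x < c)) = List.range (min n c) := by
  induction n with
  | zero => simp
  | succ n ih =>
    rw [List.range_succ, List.filter_append, ih]
    by_cases h : n < c
    · rw [Nat.min_eq_left (by omega : n ≤ c), Nat.min_eq_left (by omega : n + 1 ≤ c),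
        List.range_succ]
      simp [h]
    · rw [Nat.min_eq_right (by omega : c ≤ n), Nat.min_eq_right (by omega : c ≤ n + 1)]
      simp [h]

-- skipping a deleted tail
lemma pvGo2_skip (items : List (Int × Int)) : ∀ n i e out, e - i ≤ n → i ≤ e →
    pvGo2 items i e out = pvGo2 items e e out := by
  intro n
  induction n with
  | zero =>
    intro i e out h1 h2
    have he : i = e := by omega
    subst he
    rfl
  | succ n ih =>
    intro i e out h1 h2
    rcases Nat.eq_or_lt_of_le h2 with h | h
    · subst h; rfl
    · rw [pvGo2]
      by_cases hlen : i < items.length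
      · simp only [hlen, dif_pos, if_pos h]
        exact ih (i+1) e out (by omega) (by omega)
      · -- i ≥ length: pvGo2 i e = out; and e > i ≥ length so pvGo2 e e = out
        simp only [hlen, dite_false]
        rw [pvGo2]
        simp only [dif_neg (by omega : ¬ e < items.length)]

lemma pvGo2_e_irrel (items : List (Int × Int)) (i e e' : Nat) (out : PySem.Dict Int Int)
    (h : e ≤ i) (h' : e' ≤ i) : pvGo2 items i e out = pvGo2 items i e' out := by
  conv_lhs => rw [pvGo2]
  conv_rhs => rw [pvGo2]
  by_cases hl : i < items.length
  · simp only [hl, dif_pos, if_neg (by omega : ¬ i < e), if_neg (by omega : ¬ i < e')]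
  · simp only [hl, dite_false]

-- A's foldl equals the pure model
lemma pvA_loop_eq (items : List (Int × Int)) (hnd : (items.map Prod.fst).Nodup)
    (hpos : ∀ kv ∈ items, 0 < kv.2) :
    ∀ (j i e : Nat) (tr out : PySem.Dict Int Int), i + j = items.length → e ≤ items.length →
      (∀ x, i ≤ x → x < items.length →
        tr.get? ((items.getD x (0,0)).1)
          = if x < e then none else some ((items.getD x (0,0)).2)) →
      ((List.range' i j).foldl (fun st (y : Nat) => pvStepA (items.map Prod.fst) st (y : Int)) (tr, out)).2
        = pvGo2 items i e out := by
  intro j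
  induction j with
  | zero =>
    intro i e tr out hij he hinv
    rw [List.range'_zero, List.foldl_nil, pvGo2, dif_neg (by omega)]
  | succ j ih =>
    intro i e tr out hij he hinv
    have hi : i < items.length := by omega
    have hks : ∀ x, x < items.length → (items.map Prod.fst).getD x 0 = (items.getD x (0,0)).1 := by
      intro x hx
      rw [List.getD_eq_getElem _ _ (by simpa using hx), List.getD_eq_getElem _ _ hx,
        List.getElem_map]
    have hkeyN : ∀ y, y < items.length →
        PySem.List.pyGetD (items.map Prod.fst) ((y : Nat) : Int) 0 = (items.getD y (0,0)).1 := by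
      intro y hy
      rw [PySem.List.pyGetD_natCast]
      exact hks y hy
    have hinj : ∀ x y, x < items.length → y < items.length →
        (items.getD x (0,0)).1 = (items.getD y (0,0)).1 → x = y := by
      intro x y hx hy hxy
      have hx' : x < (items.map Prod.fst).length := by simpa using hx
      have hy' : y < (items.map Prod.fst).length := by simpa using hy
      apply (List.Nodup.getElem_inj_iff hnd (hi := hx') (hj := hy')).mp
      rw [List.getElem_map, List.getElem_map,
        ← List.getD_eq_getElem items (0,0) hx, ← List.getD_eq_getElem items (0,0) hy]
      exact hxy
    rw [List.range'_succ, List.foldl_cons]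
    by_cases hie : i < e
    · -- key already deleted: KeyError, continue
      have hnone : tr.get? ((items.getD i (0,0)).1) = none := by
        rw [hinv i (le_refl i) hi, if_pos hie]
      have hstep : pvStepA (items.map Prod.fst) (tr, out) ((i : Nat) : Int) = (tr, out) := by
        simp only [pvStepA, hkeyN i hi, hnone]
      rw [hstep, pvGo2, dif_pos hi, if_pos hie]
      exact ih (i+1) e tr out (by omega) he (fun x h1 h2 => hinv x (by omega) h2)
    · have hieg : e ≤ i := by omega
      have hvali : 0 < (items.getD i (0,0)).2 := by
        rw [List.getD_eq_getElem _ _ hi]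
        exact hpos _ (List.getElem_mem hi)
      have hsome : tr.get? ((items.getD i (0,0)).1) = some ((items.getD i (0,0)).2) := by
        rw [hinv i (le_refl i) hi, if_neg hie]
      set v' : Nat := (items.getD i (0,0)).2.toNat with hv'
      set L : Nat := min v' (items.length - i) with hL
      have hv'pos : 0 < v' := by omega
      have hLpos : 0 < L := by omega
      have hLle : i + L ≤ items.length := by omega
      have hNKI : ((PySem.List.pyRange 0 ((items.getD i (0,0)).2)).filter
            (fun x => decide ((i : Int) + x < (((items.map Prod.fst).length : Nat) : Int)))).map
              (fun x => (i : Int) + x)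
          = (List.range' i L).map (fun y : Nat => (y : Int)) := by
        rw [show (items.getD i (0,0)).2 = ((v' : Nat) : Int) by omega,
          PySem.List.pyRange_zero_natCast, List.filter_map]
        rw [show ((fun x => decide ((i : Int) + x < (((items.map Prod.fst).length : Nat) : Int)))
              ∘ (fun k : Nat => (k : Int)))
            = (fun x : Nat => decide (x < items.length - i)) from funext (fun x => by
          simp only [Function.comp_apply, List.length_map]
          rw [decide_eq_decide]
          omega)]
        rw [filter_range_lt, List.map_map, List.range'_eq_map_range, List.map_map]
        exact List.map_congr_left (fun x _ => by simp only [Function.comp_apply]; push_cast; ring)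
      have hvalsome : ∀ y, i ≤ y → y < items.length →
          tr.get? ((items.getD y (0,0)).1) = some ((items.getD y (0,0)).2) :=
        fun y h1 h2 => by rw [hinv y h1 h2, if_neg (by omega)]
      have hcondEq : (((List.range' i L).map (fun y : Nat => (y : Int))).map
            (fun x => ((tr.get? (PySem.List.pyGetD (items.map Prod.fst) x 0)).getD 0)
              == (items.getD i (0,0)).2)).all id
          = (List.range' i L).all
              (fun y => (items.getD y (0,0)).2 == (items.getD i (0,0)).2) := by
        rw [List.map_map, List.all_map, Bool.eq_iff_iff, List.all_eq_true, List.all_eq_true]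
        constructor
        · intro h y hy
          have hy' := List.mem_range'_1.mp hy
          have hh := h y hy
          simp only [Function.comp_apply, id_eq, hkeyN y (by omega),
            hvalsome y (by omega) (by omega), Option.getD_some] at hh
          exact hh
        · intro h y hy
          have hy' := List.mem_range'_1.mp hy
          have hh := h y hy
          simp only [Function.comp_apply, id_eq, hkeyN y (by omega),
            hvalsome y (by omega) (by omega), Option.getD_some]
          exact hh
      by_cases hC : ((List.range' i L).all
          (fun y => (items.getD y (0,0)).2 == (items.getD i (0,0)).2)) = true
      · -- the window is uniform: emit, delete the window
        have hmid : PySem.List.pyGetD ((List.range' i L).map (fun y : Nat => (y : Int)))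
            (min (PySem.Int.floordiv ((((List.range' i L).map (fun y : Nat => (y : Int))).length : Nat) : Int) 2)
                 ((((List.range' i L).map (fun y : Nat => (y : Int))).length : Nat) - 1)) 0
            = ((i + L/2 : Nat) : Int) := by
          simp only [List.length_map, List.length_range']
          rw [show PySem.Int.floordiv ((L : Nat) : Int) 2 = ((L/2 : Nat) : Int) from by
            exact_mod_cast PySem.Int.floordiv_natCast L 2]
          rw [min_eq_left (by omega)]
          rw [PySem.List.pyGetD_natCast, List.getD_eq_getElem _ _ (by
            simp only [List.length_map, List.length_range']
            omega), List.getElem_map, List.getElem_range']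
          norm_num
        have herase : ((List.range' i L).map (fun y : Nat => (y : Int))).foldl
              (fun t x => t.erase (PySem.List.pyGetD (items.map Prod.fst) x 0)) tr
            = ((List.range' i L).map (fun y => (items.getD y (0,0)).1)).foldl
                (fun t k => t.erase k) tr := by
          rw [List.foldl_map, List.foldl_map]
          apply PySem.List.foldl_congr_mem
          intro acc y hy
          have hy' := List.mem_range'_1.mp hy
          rw [hkeyN y (by omega)]
        have hstep : pvStepA (items.map Prod.fst) (tr, out) ((i : Nat) : Int)
            = (((List.range' i L).map (fun y => (items.getD y (0,0)).1)).foldl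
                 (fun t k => t.erase k) tr,
               out.insert ((items.getD (i + L/2) (0,0)).1) ((items.getD i (0,0)).2)) := by
          simp only [pvStepA, hkeyN i hi, hsome, hNKI, hcondEq, hC, if_true]
          rw [hmid, hkeyN (i + L/2) (by omega), herase]
        rw [hstep]
        rw [pvGo2, dif_pos hi, if_neg hie]
        rw [show min (i + (items.getD i (0,0)).2.toNat) items.length = i + L by omega]
        rw [show i + L - i = L by omega]
        rw [hC, if_pos rfl]
        apply ih (i+1) (i+L) _ _ (by omega) (by omega)
        intro x h1 h2
        rw [dict_get?_foldl_erase]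
        by_cases hxw : x < i + L
        · rw [if_pos ?_, if_pos hxw]
          exact List.mem_map.mpr ⟨x, List.mem_range'_1.mpr ⟨by omega, by omega⟩, rfl⟩
        · rw [if_neg ?_, if_neg hxw, hinv x (by omega) h2, if_neg (by omega)]
          intro hmem
          obtain ⟨y, hy, hyx⟩ := List.mem_map.mp hmem
          have hy' := List.mem_range'_1.mp hy
          have := hinj y x (by omega) h2 hyx
          omega
      · -- the window is not uniform: nothing happens at this index
        have hCf : ((List.range' i L).all
            (fun y => (items.getD y (0,0)).2 == (items.getD i (0,0)).2)) = false :=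
          eq_false_of_ne_true hC
        have hstep : pvStepA (items.map Prod.fst) (tr, out) ((i : Nat) : Int) = (tr, out) := by
          simp only [pvStepA, hkeyN i hi, hsome, hNKI, hcondEq, hCf, Bool.false_eq_true, if_false]
        rw [hstep]
        rw [pvGo2, dif_pos hi, if_neg hie]
        rw [show min (i + (items.getD i (0,0)).2.toNat) items.length = i + L by omega]
        rw [show i + L - i = L by omega]
        rw [hCf]
        simp only [Bool.false_eq_true, if_false]
        apply ih (i+1) i tr out (by omega) (by omega)
        intro x h1 h2
        rw [hinv x (by omega) h2, if_neg (by omega), if_neg (by omega)]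

lemma pvAltLoop_cons (k v : Int) (rest : List (Int × Int)) (out : PySem.Dict Int Int) :
    pvAltLoop ((k, v) :: rest) out =
      (let run := (k, v) :: rest.takeWhile (fun kv => kv.2 == v)
       let tail := rest.dropWhile (fun kv => kv.2 == v)
       let L : Int := (run.length : Int)
       let full := PySem.Int.floordiv L v
       let r := PySem.Int.mod L v
       let out1 := (PySem.List.pyRange 0 full).foldl
         (fun o b => o.insert (PySem.List.pyGetD run (b * v + PySem.Int.floordiv v 2) (0, 0)).1 v) out
       let out2 := if r > 0 ∧ tail = [] then
           out1.insert (PySem.List.pyGetD run (full * v + PySem.Int.floordiv r 2) (0, 0)).1 v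
         else out1
       pvAltLoop tail out2) := by
  rw [pvAltLoop]

lemma pv_run_split (t rest : List (Int × Int)) (v : Int)
    (ht : ∀ kv ∈ t, kv.2 = v) (hmax : ∀ kv, rest.head? = some kv → kv.2 ≠ v) :
    (t ++ rest).takeWhile (fun kv => kv.2 == v) = t ∧
    (t ++ rest).dropWhile (fun kv => kv.2 == v) = rest := by
  have htw : t.takeWhile (fun kv => kv.2 == v) = t :=
    List.takeWhile_eq_self_iff.mpr (fun x hx => by simp [ht x hx])
  have hdw : t.dropWhile (fun kv => kv.2 == v) = [] :=
    List.dropWhile_eq_nil_iff.mpr (fun x hx => by simp [ht x hx])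
  constructor
  · rw [List.takeWhile_append, htw, if_pos rfl]
    cases rest with
    | nil => simp
    | cons r rs =>
      rw [List.takeWhile_cons_of_neg (by simpa using hmax r rfl)]
      simp
  · rw [List.dropWhile_append, hdw]
    cases rest with
    | nil => simp
    | cons r rs =>
      simp only [List.isEmpty_nil, if_true]
      rw [List.dropWhile_cons_of_neg (by simpa using hmax r rfl)]

lemma pv_getD_drop (l : List (Int × Int)) (n j : Nat) (h : n + j < l.length) :
    (l.drop n).getD j (0,0) = l.getD (n+j) (0,0) := by
  rw [List.getD_eq_getElem _ _ (by simp; omega), List.getD_eq_getElem _ _ h, List.getElem_drop]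

lemma pvFold_cast (run : List (Int × Int)) (v' F : Nat) (out : PySem.Dict Int Int) :
    (PySem.List.pyRange 0 (F : Int)).foldl
        (fun o b => o.insert (PySem.List.pyGetD run (b * (v' : Int) + PySem.Int.floordiv (v' : Int) 2) (0, 0)).1 (v' : Int)) out
      = (List.range F).foldl (fun o b => o.insert (run.getD (b * v' + v'/2) (0,0)).1 (v' : Int)) out := by
  rw [PySem.List.pyRange_zero_natCast, List.foldl_map]
  apply PySem.List.foldl_congr_mem
  intro acc b _
  have h2 : PySem.Int.floordiv (v' : Int) 2 = ((v'/2 : Nat) : Int) := by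
    exact_mod_cast PySem.Int.floordiv_natCast v' 2
  have hidx : (b : Int) * (v' : Int) + ((v'/2 : Nat) : Int) = ((b * v' + v'/2 : Nat) : Int) := by
    push_cast; ring
  rw [h2, hidx, PySem.List.pyGetD_natCast]

lemma pv_div_sub (L v' : Nat) (h : 0 < v') (hle : v' ≤ L) :
    (L - v') / v' = L / v' - 1 ∧ (L - v') % v' = L % v' := by
  have hd := Nat.div_add_mod L v'
  have hF1 : 1 ≤ L / v' := (Nat.one_le_div_iff h).mpr hle
  have hmul : (L / v') * v' = (L / v' - 1) * v' + v' := by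
    conv_lhs => rw [show L / v' = (L / v' - 1) + 1 by omega]
    rw [Nat.succ_mul]
  have hrlt : L % v' < v' := Nat.mod_lt _ h
  have hsub : L - v' = (L / v' - 1) * v' + L % v' := by
    have hcomm : v' * (L / v') = L / v' * v' := Nat.mul_comm _ _
    omega
  constructor
  · rw [hsub, Nat.add_comm, Nat.add_mul_div_right _ _ h, Nat.div_eq_of_lt hrlt]
    omega
  · rw [hsub, Nat.add_comm, Nat.add_mul_mod_self_right, Nat.mod_eq_of_lt hrlt]

lemma pv_key_cast (l : List (Int × Int)) (v' a b : Nat) :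
    PySem.List.pyGetD l ((a : Int) * (v' : Int) + PySem.Int.floordiv ((b : Nat) : Int) 2) (0,0)
      = l.getD (a * v' + b/2) (0,0) := by
  have h2 : PySem.Int.floordiv ((b : Nat) : Int) 2 = ((b/2 : Nat) : Int) := by
    exact_mod_cast PySem.Int.floordiv_natCast b 2
  rw [h2, show ((a : Int) * (v' : Int) + ((b/2 : Nat) : Int)) = ((a * v' + b/2 : Nat) : Int) by
    push_cast; ring, PySem.List.pyGetD_natCast]

-- B-side: one full block of a run
lemma pvAlt_block (run rest : List (Int × Int)) (v : Int) (out : PySem.Dict Int Int)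
    (hv : 0 < v) (hall : ∀ kv ∈ run, kv.2 = v) (hlen : v.toNat ≤ run.length) (hne : run ≠ [])
    (hmax : ∀ kv, rest.head? = some kv → kv.2 ≠ v) :
    pvAltLoop (run ++ rest) out
      = pvAltLoop (run.drop v.toNat ++ rest) (out.insert (run.getD (v.toNat/2) (0,0)).1 v) := by
  obtain ⟨v', rfl⟩ : ∃ v' : Nat, v = (v' : Int) := ⟨v.toNat, by omega⟩
  rw [Int.toNat_natCast] at hlen ⊢
  have hv' : 0 < v' := by omega
  obtain ⟨⟨k0, w⟩, t, hrun⟩ : ∃ kv t, run = kv :: t := by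
    cases run with
    | nil => exact absurd rfl hne
    | cons a t => exact ⟨a, t, rfl⟩
  have hw : w = (v' : Int) := hall _ (hrun ▸ List.mem_cons_self)
  subst hw
  obtain ⟨htw, hdw⟩ := pv_run_split t rest (v' : Int)
    (fun kv hkv => hall kv (hrun ▸ List.mem_cons_of_mem _ hkv)) hmax
  rw [show run ++ rest = (k0, (v':Int)) :: (t ++ rest) by rw [hrun]; rfl, pvAltLoop_cons]
  simp only [htw, hdw, ← hrun]
  rw [PySem.Int.floordiv_natCast, PySem.Int.mod_natCast, pvFold_cast run v' (run.length / v') out,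
    pv_key_cast run v' (run.length / v') (run.length % v')]
  by_cases hEq : run.length = v'
  · -- exactly one block: the run is consumed entirely
    have hF : run.length / v' = 1 := by rw [hEq, Nat.div_self hv']
    have hr0 : run.length % v' = 0 := by rw [hEq, Nat.mod_self]
    rw [hF, hr0, List.drop_eq_nil_of_le (by omega), List.nil_append]
    rw [if_neg (by simp)]
    simp [List.range_one]
  · have hlt : v' < run.length := by omega
    have harith := pv_div_sub run.length v' hv' hlen
    have hone : 1 ≤ run.length / v' := (Nat.one_le_div_iff hv').mpr hlen
    -- decompose the block fold: first block, then the blocks of run.drop v'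
    have hOUT : (List.range (run.length / v')).foldl
          (fun o b => o.insert (run.getD (b * v' + v'/2) (0,0)).1 (v' : Int)) out
        = (List.range ((run.length - v') / v')).foldl
            (fun o b => o.insert ((run.drop v').getD (b * v' + v'/2) (0,0)).1 (v' : Int))
            (out.insert (run.getD (v'/2) (0,0)).1 (v' : Int)) := by
      rw [show run.length / v' = ((run.length - v') / v') + 1 by omega,
        List.range_succ_eq_map, List.foldl_cons, List.foldl_map]
      simp only [Nat.zero_mul, Nat.zero_add]
      apply PySem.List.foldl_congr_mem
      intro acc b hb
      have hb' : b < (run.length - v') / v' := List.mem_range.mp hb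
      have hbb : (run.length - v') / v' * v' ≤ run.length - v' := Nat.div_mul_le_self _ _
      have hmul1 : (b + 1) * v' = b * v' + v' := Nat.succ_mul b v'
      have hmul2 : (b + 1) * v' ≤ (run.length - v') / v' * v' :=
        Nat.mul_le_mul_right _ (by omega)
      have hhalf : v'/2 < v' := Nat.div_lt_self hv' (by omega)
      rw [pv_getD_drop run v' (b * v' + v'/2) (by omega)]
      have : Nat.succ b * v' + v'/2 = v' + (b * v' + v'/2) := by
        rw [Nat.succ_mul]; omega
      rw [this]
    rw [hOUT]
    -- unfold the recursive call on run.drop v' ++ rest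
    have hdropc : run.drop v' = run[v'] :: run.drop (v'+1) := List.drop_eq_getElem_cons hlt
    have hval : (run[v']'hlt).2 = (v' : Int) := hall _ (List.getElem_mem hlt)
    have hpair : (run[v']'hlt) = ((run[v']'hlt).1, (v' : Int)) := by
      rw [← hval]
    have hall2 : ∀ kv ∈ run.drop (v'+1), kv.2 = (v' : Int) :=
      fun kv hkv => hall kv (List.mem_of_mem_drop hkv)
    obtain ⟨htw2, hdw2⟩ := pv_run_split (run.drop (v'+1)) rest (v' : Int) hall2 hmax
    rw [show run.drop v' ++ rest = ((run[v']'hlt).1, (v':Int)) :: (run.drop (v'+1) ++ rest) by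
      rw [hdropc, ← hpair]; rfl, pvAltLoop_cons]
    simp only [htw2, hdw2]
    rw [show ((run[v']'hlt).1, (v':Int)) :: run.drop (v'+1) = run.drop v' by rw [hdropc, ← hpair]]
    rw [List.length_drop, PySem.Int.floordiv_natCast, PySem.Int.mod_natCast,
      pvFold_cast (run.drop v') v' ((run.length - v') / v') _,
      pv_key_cast (run.drop v') v' ((run.length - v') / v') ((run.length - v') % v')]
    rw [harith.2]
    -- both sides now differ only in the leftover branch
    by_cases hc : ((run.length % v' : Nat) : Int) > 0 ∧ rest = []
    · rw [if_pos hc, if_pos hc]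
      have hrpos : 0 < run.length % v' := by exact_mod_cast hc.1
      have hrlt : run.length % v' < v' := Nat.mod_lt _ hv'
      have hFm : run.length / v' * v' ≤ run.length := Nat.div_mul_le_self _ _
      have hFm2 : run.length = run.length / v' * v' + run.length % v' := by
        rw [Nat.mul_comm]
        exact (Nat.div_add_mod _ _).symm
      rw [pv_getD_drop run v' ((run.length - v') / v' * v' + run.length % v' / 2) (by
        have h4 : (run.length - v') / v' * v' + v' = run.length / v' * v' := by
          rw [harith.1]
          conv_rhs => rw [show run.length / v' = (run.length / v' - 1) + 1 by omega]
          rw [Nat.succ_mul]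
        omega)]
      rw [harith.1]
      have h2 : run.length / v' * v' = (run.length / v' - 1) * v' + v' := by
        conv_lhs => rw [show run.length / v' = (run.length / v' - 1) + 1 by omega]
        rw [Nat.succ_mul]
      rw [show run.length / v' * v' + run.length % v' / 2
          = v' + ((run.length / v' - 1) * v' + run.length % v' / 2) by omega]
    · rw [if_neg hc, if_neg hc]

-- B-side: a short leftover in front of a nonempty tail emits nothing
lemma pvAlt_fail (run rest : List (Int × Int)) (v : Int) (out : PySem.Dict Int Int)
    (hv : 0 < v) (hall : ∀ kv ∈ run, kv.2 = v) (hlen : run.length < v.toNat) (hne : run ≠ [])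
    (hrest : rest ≠ []) (hmax : ∀ kv, rest.head? = some kv → kv.2 ≠ v) :
    pvAltLoop (run ++ rest) out = pvAltLoop rest out := by
  obtain ⟨v', rfl⟩ : ∃ v' : Nat, v = (v' : Int) := ⟨v.toNat, by omega⟩
  rw [Int.toNat_natCast] at hlen
  obtain ⟨⟨k0, w⟩, t, rfl⟩ : ∃ kv t, run = kv :: t := by
    cases run with
    | nil => exact absurd rfl hne
    | cons a t => exact ⟨a, t, rfl⟩
  have hw : w = (v' : Int) := hall _ (List.mem_cons_self)
  subst hw
  obtain ⟨htw, hdw⟩ := pv_run_split t rest (v' : Int)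
    (fun kv hkv => hall kv (List.mem_cons_of_mem _ hkv)) hmax
  rw [List.cons_append, pvAltLoop_cons]
  simp only [htw, hdw]
  have hfull : PySem.Int.floordiv ((((k0, (v':Int)) :: t).length : Nat) : Int) (v' : Int) = 0 := by
    rw [PySem.Int.floordiv_natCast, Nat.div_eq_of_lt hlen]
    rfl
  simp only [hfull]
  rw [show PySem.List.pyRange 0 (0:Int) = [] from rfl]
  simp only [List.foldl_nil]
  rw [if_neg (fun h => hrest h.2)]

-- B-side: a short run closing the list emits its middle
lemma pvAlt_end (run : List (Int × Int)) (v : Int) (out : PySem.Dict Int Int)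
    (hv : 0 < v) (hall : ∀ kv ∈ run, kv.2 = v) (hlen : run.length < v.toNat) (hne : run ≠ []) :
    pvAltLoop run out = out.insert (run.getD (run.length/2) (0,0)).1 v := by
  obtain ⟨v', rfl⟩ : ∃ v' : Nat, v = (v' : Int) := ⟨v.toNat, by omega⟩
  rw [Int.toNat_natCast] at hlen
  obtain ⟨⟨k0, w⟩, t, rfl⟩ : ∃ kv t, run = kv :: t := by
    cases run with
    | nil => exact absurd rfl hne
    | cons a t => exact ⟨a, t, rfl⟩
  have hw : w = (v' : Int) := hall _ (List.mem_cons_self)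
  subst hw
  have htw : t.takeWhile (fun kv => kv.2 == (v' : Int)) = t :=
    List.takeWhile_eq_self_iff.mpr (fun x hx => by simp [hall x (List.mem_cons_of_mem _ hx)])
  have hdw : t.dropWhile (fun kv => kv.2 == (v' : Int)) = [] :=
    List.dropWhile_eq_nil_iff.mpr (fun x hx => by simp [hall x (List.mem_cons_of_mem _ hx)])
  rw [pvAltLoop_cons]
  simp only [htw, hdw]
  have hfull : PySem.Int.floordiv ((((k0, (v':Int)) :: t).length : Nat) : Int) (v' : Int) = 0 := by
    rw [PySem.Int.floordiv_natCast, Nat.div_eq_of_lt hlen]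
    rfl
  have hr : PySem.Int.mod ((((k0, (v':Int)) :: t).length : Nat) : Int) (v' : Int)
      = ((((k0, (v':Int)) :: t).length : Nat) : Int) := by
    rw [PySem.Int.mod_natCast, Nat.mod_eq_of_lt hlen]
  simp only [hfull, hr]
  rw [show PySem.List.pyRange 0 (0:Int) = [] from rfl]
  simp only [List.foldl_nil]
  rw [if_pos ⟨by exact_mod_cast Nat.succ_pos t.length, by trivial⟩]
  have h2 : PySem.Int.floordiv ((((k0, (v':Int)) :: t).length : Nat) : Int) 2
      = (((((k0, (v':Int)) :: t).length)/2 : Nat) : Int) := by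
    exact_mod_cast PySem.Int.floordiv_natCast ((k0, (v':Int)) :: t).length 2
  rw [show (0:Int) * (v':Int) + PySem.Int.floordiv ((((k0, (v':Int)) :: t).length : Nat) : Int) 2
      = PySem.Int.floordiv ((((k0, (v':Int)) :: t).length : Nat) : Int) 2 by ring,
    h2, PySem.List.pyGetD_natCast]
  rw [pvAltLoop]

-- the pure model equals B's run loop
lemma pvGo2_eq_alt (items : List (Int × Int)) (hpos : ∀ kv ∈ items, 0 < kv.2) :
    ∀ (n p : Nat) (out : PySem.Dict Int Int), items.length - p ≤ n →
      pvGo2 items p p out = pvAltLoop (items.drop p) out := by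
  intro n
  induction n with
  | zero =>
    intro p out hn
    rw [List.drop_eq_nil_of_le (by omega), pvGo2, dif_neg (by omega), pvAltLoop]
  | succ n ih =>
    intro p out hn
    by_cases hp : p < items.length
    · -- the run starting at p
      have hvpos : 0 < (items[p]'hp).2 := hpos _ (List.getElem_mem hp)
      set v : Int := (items[p]'hp).2 with hvdef
      set v' : Nat := v.toNat with hv'def
      have hvv : v = (v' : Int) := by omega
      have hv'pos : 0 < v' := by omega
      set t : List (Int × Int) := (items.drop (p+1)).takeWhile (fun kv => kv.2 == v) with htdef
      set restAfter : List (Int × Int) := (items.drop (p+1)).dropWhile (fun kv => kv.2 == v)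
        with hradef
      set run : List (Int × Int) := (items[p]'hp) :: t with hrundef
      have hdrop1 : items.drop (p+1) = t ++ restAfter := (List.takeWhile_append_dropWhile).symm
      have hsplit : items.drop p = run ++ restAfter := by
        rw [List.drop_eq_getElem_cons hp, hdrop1, hrundef]
        rfl
      have hlenra : (items.drop p).length = items.length - p := List.length_drop
      have hrange : p + run.length + restAfter.length = items.length := by
        have := congrArg List.length hsplit
        simp only [List.length_drop, List.length_append] at this
        omega
      have hrle : p + run.length ≤ items.length := by omega
      have hallrun : ∀ kv ∈ run, kv.2 = v := by
        intro kv hkv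
        rcases List.mem_cons.mp hkv with h | h
        · rw [h]
        · simpa using List.mem_takeWhile_imp h
      have hne : run ≠ [] := by simp [hrundef]
      have hmaxR : ∀ kv, restAfter.head? = some kv → kv.2 ≠ v := by
        intro kv hkv
        have h := List.head?_dropWhile_not (fun kv : Int × Int => kv.2 == v) (items.drop (p+1))
        rw [← hradef] at h
        rw [hkv] at h
        simpa using h
      have hidx : ∀ j, j < run.length → items.getD (p+j) (0,0) = run.getD j (0,0) := by
        intro j hj
        have hpj : p + j < items.length := by omega
        rw [List.getD_eq_getElem _ _ hpj, List.getD_eq_getElem _ _ hj]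
        have h1 : (items.drop p)[j]'(by simp only [List.length_drop]; omega) = items[p+j] := by
          rw [List.getElem_drop]
        rw [← h1]
        have h2 : (items.drop p)[j]'(by simp only [List.length_drop]; omega)
            = (run ++ restAfter)[j]'(by simp only [List.length_append]; omega) := by
          congr 1
        rw [h2, List.getElem_append_left hj]
      have hvals : ∀ x, p ≤ x → x < p + run.length → (items.getD x (0,0)).2 = v := by
        intro x h1 h2
        have hj : x - p < run.length := by omega
        have := hidx (x - p) hj
        rw [show p + (x - p) = x by omega] at this
        rw [this, List.getD_eq_getElem _ _ hj]
        exact hallrun _ (List.getElem_mem hj)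
      -- unfold pvGo2 one step
      rw [pvGo2, dif_pos hp, if_neg (lt_irrefl p)]
      rw [show (items.getD p (0,0)).2 = v by rw [List.getD_eq_getElem _ _ hp]]
      by_cases hcase : v' ≤ run.length
      · -- a full block fits: emit and jump by v'
        have hw : min (p + v.toNat) items.length = p + v' := by
          rw [← hv'def]; omega
        rw [hw]
        have hcond : ((List.range' p (p + v' - p)).all
            fun x => (items.getD x (0,0)).2 == v) = true := by
          rw [List.all_eq_true]
          intro x hx
          have hx' := List.mem_range'_1.mp hx
          simp only [beq_iff_eq]
          exact hvals x (by omega) (by omega)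
        rw [hcond, if_pos rfl]
        rw [pvGo2_skip items (p + v' - (p+1)) (p+1) (p+v') _ (by omega) (by omega)]
        rw [ih (p + v') _ (by omega)]
        rw [hsplit, pvAlt_block run restAfter v out hvpos hallrun (by omega) hne hmaxR]
        have hkey : items.getD (p + (p + v' - p)/2) (0,0) = run.getD (v.toNat/2) (0,0) := by
          rw [show p + v' - p = v' by omega, ← hv'def]
          exact hidx (v'/2) (by omega)
        rw [hkey]
        congr 1
        rw [← List.drop_append_of_le_length (by omega : v.toNat ≤ run.length), ← hsplit,
          List.drop_drop]
      · have hcase' : run.length < v' := by omega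
        by_cases hend : p + run.length = items.length
        · -- truncated leftover block closing the list: emit and stop
          have hra0 : restAfter = [] := by
            have : restAfter.length = 0 := by omega
            exact List.eq_nil_of_length_eq_zero this
          have hw : min (p + v.toNat) items.length = items.length := by
            rw [← hv'def]; omega
          rw [hw]
          have hcond : ((List.range' p (items.length - p)).all
              fun x => (items.getD x (0,0)).2 == v) = true := by
            rw [List.all_eq_true]
            intro x hx
            have hx' := List.mem_range'_1.mp hx
            simp only [beq_iff_eq]
            exact hvals x (by omega) (by omega)
          rw [hcond, if_pos rfl]
          rw [pvGo2_skip items (items.length - (p+1)) (p+1) items.length _ (by omega) (by omega)]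
          rw [pvGo2, dif_neg (lt_irrefl _)]
          rw [hsplit, hra0, List.append_nil,
            pvAlt_end run v out hvpos hallrun (by omega) hne]
          congr 2
          rw [show items.length - p = run.length by omega]
          exact hidx (run.length/2) (by omega)
        · -- window sticks out into the next run: no emission, step one entry
          have hmid : p + run.length < items.length := by omega
          have hra : restAfter ≠ [] := by
            intro h
            rw [h] at hrange
            simp at hrange
            omega
          have hcond : ((List.range' p (min (p + v.toNat) items.length - p)).all
              fun x => (items.getD x (0,0)).2 == v) = false := by
            rw [List.all_eq_false]
            refine ⟨p + run.length, List.mem_range'_1.mpr ⟨by omega, by rw [← hv'def]; omega⟩, ?_⟩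
            have h0 : restAfter.getD 0 (0,0) ∈ restAfter := by
              rw [List.getD_eq_getElem _ _ (by omega : 0 < restAfter.length)]
              exact List.getElem_mem _
            have hheadv : (restAfter.getD 0 (0,0)).2 ≠ v := by
              apply hmaxR
              rw [List.head?_eq_getElem?, List.getElem?_eq_getElem (by omega : 0 < restAfter.length),
                List.getD_eq_getElem _ _ (by omega : 0 < restAfter.length)]
            have hgx : items.getD (p + run.length) (0,0) = restAfter.getD 0 (0,0) := by
              rw [List.getD_eq_getElem _ _ hmid, List.getD_eq_getElem _ _ (by omega : 0 < restAfter.length)]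
              have h1 : (items.drop p)[run.length]'(by simp only [List.length_drop]; omega)
                  = items[p + run.length] := by rw [List.getElem_drop]
              rw [← h1]
              have h2 : (items.drop p)[run.length]'(by simp only [List.length_drop]; omega)
                  = (run ++ restAfter)[run.length]'(by simp only [List.length_append]; omega) := by
                congr 1
              rw [h2, List.getElem_append_right (le_refl _)]
              simp
            simp only [beq_iff_eq]
            rw [hgx]
            exact hheadv
          rw [hcond]
          simp only [Bool.false_eq_true, if_false]
          rw [pvGo2_e_irrel items (p+1) p (p+1) out (by omega) (by omega)]
          rw [ih (p+1) _ (by omega)]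
          -- B side: neither the leftover run head nor its tail entries emit
          rw [hsplit, pvAlt_fail run restAfter v out hvpos hallrun (by omega) hne hra hmaxR]
          have hdrop1' : items.drop (p+1) = t ++ restAfter := hdrop1
          rw [hdrop1']
          cases ht : t with
          | nil => simp
          | cons a ts =>
            rw [← ht]
            have hallt : ∀ kv ∈ t, kv.2 = v := fun kv hkv => by
              simpa using List.mem_takeWhile_imp hkv
            rw [pvAlt_fail t restAfter v out hvpos hallt (by
                have : run.length = t.length + 1 := by rw [hrundef]; rfl
                omega) (by simp [ht]) hra hmaxR]
    · rw [List.drop_eq_nil_of_le (by omega), pvGo2, dif_neg (by omega), pvAltLoop]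

lemma pv_main (l : List (Int × Int)) :
    resolve_tuplet_record l = resolve_tuplet_record_alt l := by
  rw [pvA_eq l, pvB_eq l]
  have hnd0 : (pvD l).keys.Nodup := PySem.Dict.nodup_keys_ofList l
  have hndI : ((pvItems l).map Prod.fst).Nodup := by
    have hsub : ((pvD l).items.filter (fun kv => decide (kv.2 > 0))).Sublist (pvD l).items :=
      List.filter_sublist
    exact (hsub.map Prod.fst).nodup hnd0
  have hposI : ∀ kv ∈ pvItems l, 0 < kv.2 := by
    intro kv hkv
    have h := List.mem_filter.mp hkv
    simpa using h.2
  have hks : (pvTr0 l).keys = (pvItems l).map Prod.fst := by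
    rw [show (pvTr0 l).keys = (pvTr0 l).items.map Prod.fst from rfl, pvTr0_items]
  have hndK : (pvTr0 l).keys.Nodup := by rw [hks]; exact hndI
  have hinv : ∀ x, 0 ≤ x → x < (pvItems l).length →
      (pvTr0 l).get? (((pvItems l).getD x (0,0)).1)
        = if x < 0 then none else some (((pvItems l).getD x (0,0)).2) := by
    intro x _ hx
    rw [if_neg (by omega)]
    apply PySem.Dict.get?_of_mem_items _ _ hndK
    rw [pvTr0_items]
    have hmem : (pvItems l).getD x (0,0) ∈ pvItems l := by
      rw [List.getD_eq_getElem _ _ hx]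
      exact List.getElem_mem hx
    simpa using hmem
  have hA := pvA_loop_eq (pvItems l) hndI hposI (pvItems l).length 0 0 (pvTr0 l)
    PySem.Dict.empty (by omega) (by omega) hinv
  have hB := pvGo2_eq_alt (pvItems l) hposI (pvItems l).length 0 PySem.Dict.empty (by omega)
  rw [List.drop_zero] at hB
  rw [← List.range_eq_range'] at hA
  rw [hks, List.length_map, PySem.List.pyRange_zero_natCast, List.foldl_map]
  exact congrArg PySem.Dict.items (hA.trans hB)

-- ===== VERDICT (by name: the statement is the Claim_ definition above) =====
theorem resolve_tuplet_record_spec : Claim_equal_resolve_tuplet_record := by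
  intro l _
  unfold Spec_resolve_tuplet_record
  exact pv_main l
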